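-- pv_equiv track=rewrite | github.com/heggria/agent-usage-atlas | src/agent_usage_atlas/aggregation/tool_safety.py | _detect_edit_without_verify
-- ===== SOURCE A (Python) =====
-- def _detect_edit_without_verify(sequences: dict) -> tuple[int, int]:
--     """Edit followed immediately by another Edit without an intervening Read."""
--     total = 0
--     sessions = 0
--     for seq in sequences.values():
--         hits = 0
--         prev = None
--         for tool in seq:
--             if tool == "Edit" and prev == "Edit":
--                 hits += 1
--             prev = tool
--         if hits:
--             total += hits
--             sessions += 1
--     return total, sessions
-- ===== SOURCE B (Python) =====
-- def _run_starts(seq) -> int: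
--     """Number of maximal runs of consecutive 'Edit' tokens."""
--     return sum(1 for i, t in enumerate(seq)
--                if t == "Edit" and (i == 0 or seq[i - 1] != "Edit"))
--
--
-- def _detect_edit_without_verify(sequences: dict) -> tuple[int, int]:
--     per_seq = [seq.count("Edit") - _run_starts(seq) for seq in sequences.values()]
--     return sum(per_seq), sum(1 for h in per_seq if h)
-- ===== Notes on version B (the rewrite author's own statement) =====
-- stated objective: alternative
-- what changed: The single stateful loop (prev-tracking pairwise scan with two running accumulators) is replaced by staged passes: per sequence, hits = count of 'Edit' tokens minus the number of maximal Edit-runs (a run of k Edits has k-1 consecutive pairs), collected into a list, from which total is the sum and sessions the count of nonzero entries.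
import Mathlib
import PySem

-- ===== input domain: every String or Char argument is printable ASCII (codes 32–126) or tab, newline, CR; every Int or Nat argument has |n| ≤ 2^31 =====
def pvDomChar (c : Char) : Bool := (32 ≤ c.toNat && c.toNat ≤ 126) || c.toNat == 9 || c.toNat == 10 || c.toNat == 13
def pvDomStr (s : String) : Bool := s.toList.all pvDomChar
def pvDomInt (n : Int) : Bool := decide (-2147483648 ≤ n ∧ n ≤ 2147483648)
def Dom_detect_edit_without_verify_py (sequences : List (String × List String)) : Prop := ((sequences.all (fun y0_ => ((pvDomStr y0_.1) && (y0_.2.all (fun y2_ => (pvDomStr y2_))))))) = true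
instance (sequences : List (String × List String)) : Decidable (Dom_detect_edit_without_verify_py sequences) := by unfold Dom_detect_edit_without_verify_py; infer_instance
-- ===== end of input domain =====

-- B replaces A's single stateful prev-tracking loop with two running accumulators by
-- staged passes: per sequence hits = (count of "Edit") - (number of maximal Edit-runs,
-- found from adjacent pairs via zip), collected into a list whose sum and count of
-- nonzero entries give the result; alternative decomposition, same cost.

-- ===== PORT A =====
-- inner loop of A: carries prev and the hits accumulator
def pvInnerA (prev : Option String) (hits : Int) : List String → Int
  | [] => hits
  | t :: ts => pvInnerA (some t) (if t = "Edit" ∧ prev = some "Edit" then hits + 1 else hits) ts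

def detect_edit_without_verify_py (sequences : List (String × List String)) : Int × Int :=
  sequences.foldl (fun (acc : Int × Int) p =>
    let hits := pvInnerA none 0 p.2
    if hits ≠ 0 then (acc.1 + hits, acc.2 + 1) else acc) (0, 0)

-- ===== PORT B =====
-- _run_starts: 1 for an "Edit" at the head, plus adjacent pairs (p, t) from zip(seq, seq[1:])
-- where t is an "Edit" that does not continue a run
def pvRunStarts (seq : List String) : Int :=
  if seq = [] then 0
  else (if seq.headD "" = "Edit" then 1 else 0) +
    (seq.zip seq.tail).foldl
      (fun (s : Int) pt => if pt.2 = "Edit" ∧ pt.1 ≠ "Edit" then s + 1 else s) 0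

def detect_edit_without_verify_py_alt (sequences : List (String × List String)) : Int × Int :=
  let per := sequences.map (fun p => (PySem.List.count p.2 "Edit" : Int) - pvRunStarts p.2)
  (per.sum, ((per.countP (fun h => h != 0) : Nat) : Int))

-- ===== PRECONDITION & SPEC =====
def Spec_detect_edit_without_verify_py (sequences : List (String × List String)) (out : Int × Int) : Prop := out = detect_edit_without_verify_py_alt sequences
instance (sequences : List (String × List String)) (out : Int × Int) : Decidable (Spec_detect_edit_without_verify_py sequences out) := by unfold Spec_detect_edit_without_verify_py; infer_instance

-- ===== CLAIM (what is proved, stated in full; the proofs are below) =====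
def Claim_equal_detect_edit_without_verify_py : Prop := ∀ (sequences : List (String × List String)), Dom_detect_edit_without_verify_py sequences → Spec_detect_edit_without_verify_py sequences (detect_edit_without_verify_py sequences)

-- ===== LEMMAS AND PROOFS =====
-- proof-only helper: run starts counted structurally, with the previous token explicit
def pvRunsAux (prev : String) : List String → Int
  | [] => 0
  | t :: ts => (if t = "Edit" ∧ prev ≠ "Edit" then 1 else 0) + pvRunsAux t ts

theorem pvZip_foldl (ts : List String) : ∀ (prev : String) (a : Int),
    ((prev :: ts).zip ts).foldl
      (fun (s : Int) pt => if pt.2 = "Edit" ∧ pt.1 ≠ "Edit" then s + 1 else s) a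
    = a + pvRunsAux prev ts := by
  induction ts with
  | nil => intro prev a; simp [pvRunsAux]
  | cons t ts ih =>
    intro prev a
    simp only [List.zip_cons_cons, List.foldl_cons, ih, pvRunsAux]
    by_cases h : t = "Edit" ∧ prev ≠ "Edit" <;> (simp [h]; try ring)

theorem pvRunStarts_cons (t : String) (ts : List String) :
    pvRunStarts (t :: ts) = (if t = "Edit" then 1 else 0) + pvRunsAux t ts := by
  simp [pvRunStarts, pvZip_foldl]

theorem pvInnerA_some (ts : List String) : ∀ (p : String) (hits : Int),
    pvInnerA (some p) hits ts = hits + (ts.count "Edit" : Int) - pvRunsAux p ts := by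
  induction ts with
  | nil => intro p hits; simp [pvInnerA, pvRunsAux]
  | cons t ts ih =>
    intro p hits
    simp only [pvInnerA, pvRunsAux, ih, List.count_cons]
    by_cases ht : t = "Edit" <;> by_cases hp : p = "Edit" <;>
      (simp [ht, hp]; try ring)

theorem pvInnerA_eq (seq : List String) :
    pvInnerA none 0 seq = (seq.count "Edit" : Int) - pvRunStarts seq := by
  cases seq with
  | nil => simp [pvInnerA, pvRunStarts]
  | cons t ts =>
    simp only [pvInnerA, pvRunStarts_cons, List.count_cons, pvInnerA_some]
    by_cases ht : t = "Edit" <;> (simp [ht]; try ring)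

theorem pvOuter (l : List (String × List String)) : ∀ (acc : Int × Int),
    l.foldl (fun (acc : Int × Int) p =>
      let hits := pvInnerA none 0 p.2
      if hits ≠ 0 then (acc.1 + hits, acc.2 + 1) else acc) acc
    = (acc.1 + (l.map (fun p => (PySem.List.count p.2 "Edit" : Int) - pvRunStarts p.2)).sum,
       acc.2 + (((l.map (fun p => (PySem.List.count p.2 "Edit" : Int) - pvRunStarts p.2)).countP
          (fun h => h != 0) : Nat) : Int)) := by
  induction l with
  | nil => intro acc; simp
  | cons p l ih =>
    intro acc
    rw [List.foldl_cons, ih]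
    simp only [List.map_cons, List.sum_cons, List.countP_cons, pvInnerA_eq,
      PySem.List.count_eq]
    by_cases h : (p.2.count "Edit" : Int) - pvRunStarts p.2 = 0
    · simp [h]
    · simp [h, Prod.ext_iff]
      constructor <;> (push_cast; ring)

-- ===== VERDICT (by name: the statement is the Claim_ definition above) =====
theorem detect_edit_without_verify_py_spec : Claim_equal_detect_edit_without_verify_py := by
  intro sequences _
  show detect_edit_without_verify_py sequences = detect_edit_without_verify_py_alt sequences
  unfold detect_edit_without_verify_py detect_edit_without_verify_py_alt
  rw [pvOuter]
  simp
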